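-- pv_equiv track=rewrite | github.com/LucaCtt/lab_llm_tools | src/lab/example_3_wikidata.py | _choose_nationality
-- ===== SOURCE A (Python) =====
-- COUNTRY_TO_NATIONALITY = {
--     "United Kingdom": "British",
--     "Great Britain": "British",
--     "England": "English",
--     "Scotland": "Scottish",
--     "Wales": "Welsh",
--     "Netherlands": "Dutch",
--     "Kingdom of the Netherlands": "Dutch",
--     "Germany": "German",
--     "Spain": "Spanish",
--     "Monaco": "Monegasque",
--     "Belgium": "Belgian",
--     "Italy": "Italian",
--     "France": "French",
--     "Finland": "Finnish",
--     "Brazil": "Brazilian",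
-- }
--
-- PRIMARY_NATIONALITY_ORDER = [
--     "British",
--     "Dutch",
--     "German",
--     "Spanish",
--     "Monegasque",
--     "French",
--     "Italian",
--     "Finnish",
--     "Brazilian",
--     "Belgian",
-- ]
--
-- def _normalize_nationality(label: str | None) -> str | None:
--     if not label:
--         return None
--     return COUNTRY_TO_NATIONALITY.get(label, label)
--
-- def _choose_nationality(labels: list[str]) -> str | None:
--     normalized = []
--     seen = set()
--     for label in labels:
--         nationality = _normalize_nationality(label)
--         if nationality and nationality not in seen:
--             seen.add(nationality)
--             normalized.append(nationality)
--
--     for preferred in PRIMARY_NATIONALITY_ORDER: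
--         if preferred in normalized:
--             return preferred
--     return normalized[0] if normalized else None
-- ===== SOURCE B (Python) =====
-- COUNTRY_TO_NATIONALITY = {
--     "United Kingdom": "British",
--     "Great Britain": "British",
--     "England": "English",
--     "Scotland": "Scottish",
--     "Wales": "Welsh",
--     "Netherlands": "Dutch",
--     "Kingdom of the Netherlands": "Dutch",
--     "Germany": "German",
--     "Spain": "Spanish",
--     "Monaco": "Monegasque",
--     "Belgium": "Belgian",
--     "Italy": "Italian",
--     "France": "French",
--     "Finland": "Finnish",
--     "Brazil": "Brazilian",
-- }
--
-- PRIMARY_NATIONALITY_ORDER = [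
--     "British",
--     "Dutch",
--     "German",
--     "Spanish",
--     "Monegasque",
--     "French",
--     "Italian",
--     "Finnish",
--     "Brazilian",
--     "Belgian",
-- ]
--
-- _RANK = {nat: i for i, nat in enumerate(PRIMARY_NATIONALITY_ORDER)}
-- _DEFAULT_RANK = len(PRIMARY_NATIONALITY_ORDER)
--
--
-- def _choose_nationality(labels):
--     # Single pass: track the best (lowest-rank, earliest) nationality directly,
--     # instead of building a normalized list and rescanning the preference order.
--     seen = set()
--     best = None  # (rank, nationality)
--     for label in labels:
--         nat = COUNTRY_TO_NATIONALITY.get(label, label) if label else None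
--         if nat and nat not in seen:
--             seen.add(nat)
--             r = _RANK.get(nat, _DEFAULT_RANK)
--             if best is None or r < best[0]:
--                 best = (r, nat)
--     return best[1] if best is not None else None
-- ===== Notes on version B (the rewrite author's own statement) =====
-- stated objective: alternative
-- what changed: B replaces A's two-phase approach (build a deduped normalized list, then rescan the fixed preference order with repeated membership tests) by a single pass over the labels that tracks the best (lowest-rank, earliest) nationality directly via a prebuilt rank table, never materialising the normalized list.
import Mathlib
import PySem

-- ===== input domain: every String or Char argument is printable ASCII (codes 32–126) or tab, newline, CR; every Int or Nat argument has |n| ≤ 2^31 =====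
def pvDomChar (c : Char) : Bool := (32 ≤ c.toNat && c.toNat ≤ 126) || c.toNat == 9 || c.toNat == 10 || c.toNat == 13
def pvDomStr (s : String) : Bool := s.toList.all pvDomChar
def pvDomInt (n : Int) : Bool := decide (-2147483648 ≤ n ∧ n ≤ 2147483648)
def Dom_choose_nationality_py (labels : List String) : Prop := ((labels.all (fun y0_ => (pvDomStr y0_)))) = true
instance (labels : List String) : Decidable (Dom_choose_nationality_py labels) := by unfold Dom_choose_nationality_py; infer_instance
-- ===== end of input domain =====

-- B is a structurally different single-pass implementation (alternative decomposition): it tracks the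
-- best (lowest-rank, earliest) nationality during the one pass over labels, instead of building a
-- deduped normalized list and rescanning the fixed preference order.

-- ===== PORT A =====
def pvC2N : PySem.Dict String String := PySem.Dict.ofList
  [("United Kingdom","British"),("Great Britain","British"),("England","English"),
   ("Scotland","Scottish"),("Wales","Welsh"),("Netherlands","Dutch"),
   ("Kingdom of the Netherlands","Dutch"),("Germany","German"),("Spain","Spanish"),
   ("Monaco","Monegasque"),("Belgium","Belgian"),("Italy","Italian"),("France","French"),
   ("Finland","Finnish"),("Brazil","Brazilian")]

def pvORDER : List String :=
  ["British","Dutch","German","Spanish","Monegasque","French","Italian","Finnish","Brazilian","Belgian"]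

-- _normalize_nationality: 'if not label: return None; return COUNTRY_TO_NATIONALITY.get(label, label)'
def normalize_nationality_py (label : String) : Option String :=
  if label == "" then none else some (pvC2N.getD label label)

-- A's first loop body: normalized.append / seen.add under the truthiness + membership test
def pvAStep (st : List String × PySem.Set String) (label : String) : List String × PySem.Set String :=
  match normalize_nationality_py label with
  | none => st
  | some nat =>
      if nat != "" && !(PySem.Set.contains st.2 nat) then (st.1 ++ [nat], PySem.Set.add st.2 nat)
      else st

-- A's second loop over PRIMARY_NATIONALITY_ORDER, then 'normalized[0] if normalized else None'
def pvAScan : List String → List String → Option String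
  | [], normalized => normalized.head?
  | p :: ps, normalized => if normalized.contains p then some p else pvAScan ps normalized

def choose_nationality_py (labels : List String) : Option String :=
  let st := labels.foldl pvAStep ([], PySem.Set.ofList [])
  pvAScan pvORDER st.1

-- ===== PORT B =====
def pvRANK : PySem.Dict String Int := PySem.Dict.ofList
  [("British",0),("Dutch",1),("German",2),("Spanish",3),("Monegasque",4),
   ("French",5),("Italian",6),("Finnish",7),("Brazilian",8),("Belgian",9)]

def pvDEFAULT_RANK : Int := 10

-- B's loop body: same normalization/dedup test, but tracks best = (rank, nationality) directly
def pvBStep (st : PySem.Set String × Option (Int × String)) (label : String) :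
    PySem.Set String × Option (Int × String) :=
  let nat? := if label == "" then none else some (pvC2N.getD label label)
  match nat? with
  | none => st
  | some nat =>
      if nat != "" && !(PySem.Set.contains st.1 nat) then
        let r := pvRANK.getD nat pvDEFAULT_RANK
        let best :=
          match st.2 with
          | none => some (r, nat)
          | some (br, bn) => if r < br then some (r, nat) else some (br, bn)
        (PySem.Set.add st.1 nat, best)
      else st

def choose_nationality_py_alt (labels : List String) : Option String :=
  (labels.foldl pvBStep (PySem.Set.ofList [], none)).2.map Prod.snd

-- ===== PRECONDITION & SPEC =====
def Spec_choose_nationality_py (labels : List String) (out : Option String) : Prop := out = choose_nationality_py_alt labels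
instance (labels : List String) (out : Option String) : Decidable (Spec_choose_nationality_py labels out) := by unfold Spec_choose_nationality_py; infer_instance

-- ===== CLAIM (what is proved, stated in full; the proofs are below) =====
def Claim_equal_choose_nationality_py : Prop := ∀ (labels : List String), Dom_choose_nationality_py labels → Spec_choose_nationality_py labels (choose_nationality_py labels)

-- ===== LEMMAS AND PROOFS =====

-- B's best-update step, abstracted over the key function
def pvMinStep (key : String → Int) (b : Option (Int × String)) (n : String) : Option (Int × String) :=
  match b with
  | none => some (key n, n)
  | some (br, bn) => if key n < br then some (key n, n) else some (br, bn)

def pvPick (key : String → Int) (l : List String) : Option (Int × String) :=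
  l.foldl (pvMinStep key) none

set_option maxHeartbeats 2000000 in
theorem pvRANK_eq_idxOf (n : String) :
    pvRANK.getD n pvDEFAULT_RANK = (pvORDER.idxOf n : Int) := by
  have h : pvRANK = PySem.Dict.mk
    [("British",0),("Dutch",1),("German",2),("Spanish",3),("Monegasque",4),
     ("French",5),("Italian",6),("Finnish",7),("Brazilian",8),("Belgian",9)] := by rfl
  rw [h]
  simp only [pvDEFAULT_RANK, PySem.Dict.getD_eq_get?_getD, PySem.Dict.get?_mk_cons, pvORDER,
    List.idxOf, List.findIdx, List.findIdx.go, Bool.cond_eq_ite]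
  split_ifs <;> simp_all
  rfl

-- if nothing in xs beats the accumulator, the fold keeps it
theorem pvKeep (key : String → Int) (xs : List String) (b : Int × String)
    (h : ∀ n ∈ xs, ¬ key n < b.1) :
    xs.foldl (pvMinStep key) (some b) = some b := by
  induction xs with
  | nil => rfl
  | cons x xs ih =>
      simp only [List.foldl_cons, pvMinStep]
      rw [if_neg (h x (by simp))]
      exact ih (fun n hn => h n (by simp [hn]))

theorem pvPick_const_zero (l : List String) :
    (pvPick (fun _ => (0 : Int)) l).map Prod.snd = l.head? := by
  cases l with
  | nil => rfl
  | cons x xs =>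
      simp only [pvPick, List.foldl_cons, pvMinStep]
      rw [pvKeep _ xs (0, x) (by intro n _; simp)]
      rfl

def pvInv (key : String → Int) : Option (Int × String) → Prop
  | none => True
  | some (br, bn) => br = key bn

theorem pvUniqMin (key : String → Int) (o : String)
    (hk0 : key o = 0) (hknn : ∀ n, 0 ≤ key n) (hku : ∀ n, n ≠ o → 1 ≤ key n)
    (xs : List String) (b : Option (Int × String)) (hinv : pvInv key b)
    (hreach : o ∈ xs ∨ b = some (0, o)) :
    xs.foldl (pvMinStep key) b = some (0, o) := by
  induction xs generalizing b with
  | nil =>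
      rcases hreach with h | h
      · exact absurd h List.not_mem_nil
      · exact h
  | cons x xs ih =>
      have hinv' : pvInv key (pvMinStep key b x) := by
        cases b with
        | none => simp [pvMinStep, pvInv]
        | some p =>
            obtain ⟨br, bn⟩ := p
            simp only [pvMinStep]
            split_ifs <;> simpa [pvInv] using hinv
      have hreach' : o ∈ xs ∨ pvMinStep key b x = some (0, o) := by
        rcases hreach with h | h
        · by_cases hxo : x = o
          · right
            subst hxo
            cases b with
            | none => simp [pvMinStep, hk0]
            | some p =>
                obtain ⟨br, bn⟩ := p
                simp only [pvInv] at hinv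
                subst hinv
                by_cases hbn : bn = x
                · subst hbn
                  simp only [pvMinStep]
                  split_ifs <;> simp [hk0]
                · have h1 : 1 ≤ key bn := hku bn hbn
                  have hlt : key x < key bn := by omega
                  simp only [pvMinStep]
                  rw [if_pos hlt]
                  simp [hk0]
          · rcases List.mem_cons.1 h with h' | h'
            · exact absurd h'.symm hxo
            · exact Or.inl h'
        · right
          subst h
          simp only [pvMinStep]
          rw [if_neg (by have := hknn x; omega)]
      simp only [List.foldl_cons]
      exact ih _ hinv' hreach'

theorem pvShift (key key' : String → Int) (xs : List String)
    (h : ∀ n ∈ xs, key n = 1 + key' n) (b : Option (Int × String)) :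
    xs.foldl (pvMinStep key) (b.map (fun p => (1 + p.1, p.2))) =
      (xs.foldl (pvMinStep key') b).map (fun p => (1 + p.1, p.2)) := by
  induction xs generalizing b with
  | nil => rfl
  | cons x xs ih =>
      have hx := h x (by simp)
      have hrest : ∀ n ∈ xs, key n = 1 + key' n := fun n hn => h n (by simp [hn])
      simp only [List.foldl_cons]
      rw [← ih hrest]
      congr 1
      cases b with
      | none => simp [pvMinStep, hx]
      | some p =>
          obtain ⟨br, bn⟩ := p
          simp only [pvMinStep, Option.map_some, hx]
          by_cases hlt : key' x < br
          · rw [if_pos (by omega), if_pos hlt]; rfl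
          · rw [if_neg (by omega), if_neg hlt]; rfl

theorem pvScan_eq_pick (os : List String) (hnd : os.Nodup) (l : List String) :
    pvAScan os l = (pvPick (fun n => (os.idxOf n : Int)) l).map Prod.snd := by
  induction os generalizing l with
  | nil =>
      simp only [pvAScan, List.idxOf_nil, Nat.cast_zero]
      exact (pvPick_const_zero l).symm
  | cons o os ih =>
      have hno : o ∉ os := (List.nodup_cons.1 hnd).1
      have hnd' : os.Nodup := (List.nodup_cons.1 hnd).2
      simp only [pvAScan]
      by_cases hc : l.contains o = true
      · rw [if_pos hc]
        have hmem : o ∈ l := by simpa using hc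
        have hpick : pvPick (fun n => ((o :: os).idxOf n : Int)) l = some (0, o) := by
          apply pvUniqMin
          · simp [List.idxOf_cons_self]
          · intro n; positivity
          · intro n hn
            show (1 : Int) ≤ ((o :: os).idxOf n : Int)
            rw [List.idxOf_cons_ne _ (Ne.symm hn)]
            push_cast
            omega
          · trivial
          · exact Or.inl hmem
        rw [hpick]
        rfl
      · rw [if_neg hc]
        have hnl : o ∉ l := by simpa using hc
        rw [ih hnd' l]
        have hsh := pvShift (fun n => ((o :: os).idxOf n : Int)) (fun n => (os.idxOf n : Int)) l
          (by
            intro n hn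
            have hne : o ≠ n := fun he => hnl (he ▸ hn)
            show (((o :: os).idxOf n : Nat) : Int) = 1 + ((os.idxOf n : Nat) : Int)
            rw [List.idxOf_cons_ne _ hne]
            push_cast
            omega) none
        simp only [Option.map_none] at hsh
        show (pvPick (fun n => (os.idxOf n : Int)) l).map Prod.snd
          = (pvPick (fun n => (((o :: os).idxOf n : Nat) : Int)) l).map Prod.snd
        rw [pvPick, pvPick, hsh, Option.map_map]
        rfl

theorem pvFold_rel (key : String → Int) (hkey : key = fun n => pvRANK.getD n pvDEFAULT_RANK)
    (labels : List String) (norm : List String) (seen : PySem.Set String) :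
    labels.foldl pvBStep (seen, pvPick key norm) =
      ((labels.foldl pvAStep (norm, seen)).2, pvPick key (labels.foldl pvAStep (norm, seen)).1) := by
  induction labels generalizing norm seen with
  | nil => rfl
  | cons x labels ih =>
      simp only [List.foldl_cons]
      have hstep : pvBStep (seen, pvPick key norm) x
          = ((pvAStep (norm, seen) x).2, pvPick key (pvAStep (norm, seen) x).1) := by
        simp only [pvAStep, pvBStep, normalize_nationality_py]
        by_cases he : (x == "") = true
        · simp [he]
        · simp only [he, Bool.false_eq_true, if_false]
          split_ifs with hcond
          · have hkr : pvRANK.getD (pvC2N.getD x x) pvDEFAULT_RANK = key (pvC2N.getD x x) := by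
              rw [hkey]
            have happ : pvPick key (norm ++ [pvC2N.getD x x])
                = pvMinStep key (pvPick key norm) (pvC2N.getD x x) := by
              rw [pvPick, pvPick, List.foldl_append]
              rfl
            rw [happ, hkr]
            cases pvPick key norm with
            | none => rfl
            | some p => obtain ⟨br, bn⟩ := p; rfl
          · rfl
      rw [hstep, ih]

-- ===== VERDICT (by name: the statement is the Claim_ definition above) =====
theorem choose_nationality_py_spec : Claim_equal_choose_nationality_py := by
  intro labels _
  unfold Spec_choose_nationality_py choose_nationality_py choose_nationality_py_alt
  have hfold := pvFold_rel (fun n => pvRANK.getD n pvDEFAULT_RANK) rfl labels [] (PySem.Set.ofList [])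
  rw [show pvPick (fun n => pvRANK.getD n pvDEFAULT_RANK) [] = none from rfl] at hfold
  rw [hfold]
  have hkeys : (fun n => pvRANK.getD n pvDEFAULT_RANK) = (fun n => (pvORDER.idxOf n : Int)) :=
    funext pvRANK_eq_idxOf
  rw [hkeys]
  show pvAScan pvORDER (List.foldl pvAStep ([], PySem.Set.ofList []) labels).1
      = Option.map Prod.snd (pvPick (fun n => (pvORDER.idxOf n : Int))
          (List.foldl pvAStep ([], PySem.Set.ofList []) labels).1)
  exact pvScan_eq_pick pvORDER (by decide) _
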